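-- pv_equiv track=rewrite | github.com/fabiosferra/DSCALE | downscaler/utils_dictionary.py | find_best_key_match_by_common_values
-- ===== SOURCE A (Python) =====
-- def fun_sort_dict(d: dict, by="keys", reverse=False) -> dict:
--     """Returns a sorted dictionary (`d`), by keys or values.
--
--     Parameters
--     ----------
--     d : dict
--         Your dictionary
--     by : str, optional
--         Wheter you want to sort your dictionary by "keys" or "values", by default "keys"
--     reverse : bool, optional
--         Wheter you want to sort in reverse order, by default False
--
--     Returns
--     -------
--     dict
--         Sorted dictionary
--
--     Raises
--     ------
--     ValueError
--         If `by` is not in ['keys', 'values']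
--     """
--     i_dict = {"keys": 0, "values": 1}
--     if by in i_dict:
--         return dict(sorted(d.items(), key=lambda item: item[i_dict[by]], reverse=reverse))
--     text="`by` needs to match one of the following:"
--     raise ValueError(f"{text} {i_dict.keys()}. You have selected: {by}")
--
-- def find_best_key_match_by_common_values(mydict:dict)->dict:
--     """Finds best match across keys in a dictionary (based on how many values they have in common).
--
--     Parameters
--     ----------
--     mydict : dict
--         Your dictionary
--
--     Returns
--     -------
--     dict
--         A dictionary with pairs of similar keys (based on how many values they have in common)
--     """
--     # mydict={k:v if isinstance(v, list) else [v] for k,v in mydict.items()}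
--     # res={}
--     # for k in mydict:
--     #     best_match=list(fun_sort_dict({x:len(set(mydict[k])&set(mydict[x])) for x in mydict.keys() if x!=k}, by='values', reverse=True).keys())[:1]
--     #     res[k]=best_match
--     # return {k:v for k,v in res.items() if len(v)>0}
--     mydict={k:v if isinstance(v, list) else [v] for k,v in mydict.items()}
--     mydict={k:v+[k] for k,v in mydict.items()}
--     res={}
--     for k in mydict:
--         best_match=fun_sort_dict({x:len(set(mydict[k])&set(mydict[x])) for x in mydict.keys() if x!=k}, by='values', reverse=True)
--         best_match={k:v for k,v in best_match.items() if v!=0}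
--         res[k]=list(best_match.keys())[:1]
--     return res
-- ===== SOURCE B (Python) =====
-- def find_best_key_match_by_common_values(mydict: dict) -> dict:
--     """Single-pass argmax per key: no sorting, sets built once up front."""
--     aug = {}
--     for k, v in mydict.items():
--         vals = v if isinstance(v, list) else [v]
--         aug[k] = list(dict.fromkeys(vals + [k]))  # deduped, order-preserving
--     res = {}
--     for k, vk in aug.items():
--         vk_set = set(vk)
--         best_key, best_count = None, 0
--         for x, vx in aug.items():
--             if x == k:
--                 continue
--             c = sum(1 for z in vx if z in vk_set)
--             if c > best_count:
--                 best_key, best_count = x, c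
--         res[k] = [best_key] if best_key is not None else []
--     return res
-- ===== Notes on version B (the rewrite author's own statement) =====
-- stated objective: simpler
-- what changed: Per key, A rebuilds both value-sets for every pair, builds a counts dict over all other keys, stable-sorts it descending by value, drops zero counts and takes the first key; B deduplicates each augmented value list once up front and picks the best match with a single strict-greater argmax scan (same first-max tie-break), with no sorting and no intermediate dicts.
import Mathlib
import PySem

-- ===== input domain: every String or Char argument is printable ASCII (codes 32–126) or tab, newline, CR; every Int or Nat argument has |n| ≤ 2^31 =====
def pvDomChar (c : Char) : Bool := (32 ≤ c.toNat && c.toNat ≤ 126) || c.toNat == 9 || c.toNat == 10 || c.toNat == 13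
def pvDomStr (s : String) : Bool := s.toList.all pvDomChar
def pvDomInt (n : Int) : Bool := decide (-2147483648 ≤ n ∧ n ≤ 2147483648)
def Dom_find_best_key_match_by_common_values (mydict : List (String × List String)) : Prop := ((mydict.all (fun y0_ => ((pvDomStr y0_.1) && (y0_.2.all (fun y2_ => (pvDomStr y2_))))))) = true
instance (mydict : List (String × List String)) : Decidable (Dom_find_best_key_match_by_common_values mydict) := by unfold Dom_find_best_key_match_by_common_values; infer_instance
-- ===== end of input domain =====

-- B replaces A's per-key "build a counts dict, sort it descending, drop zeros, take the first key"
-- by a single strict-argmax scan over value lists deduplicated once up front (objective: simpler — no sort).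

-- ===== PORT A =====
-- port of fun_sort_dict specialized to its only call site in A (by='values'); the by='keys'
-- branch and the ValueError raise are unreachable there
def fun_sort_dict_values (d : PySem.Dict String Int) (reverse : Bool) : PySem.Dict String Int :=
  PySem.Dict.ofList (PySem.List.sorted d.items (fun it => it.2) reverse)

def find_best_key_match_by_common_values (mydict : List (String × List String)) : List (String × List String) :=
  -- the argument dict
  let d0 : PySem.Dict String (List String) := PySem.Dict.ofList mydict
  -- mydict={k: v if isinstance(v, list) else [v]}: identity under the type convention (values are lists);
  -- mydict={k: v+[k]}
  let d2 : PySem.Dict String (List String) :=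
    PySem.Dict.ofList (d0.items.map (fun p => (p.1, p.2 ++ [p.1])))
  -- for k in mydict: (kp.1 = k, kp.2 = mydict[k]; keys of a dict are unique)
  let res : PySem.Dict String (List String) :=
    d2.items.foldl (fun res kp =>
      -- {x: len(set(mydict[k]) & set(mydict[x])) for x in mydict.keys() if x != k}
      let counts : PySem.Dict String Int :=
        PySem.Dict.ofList ((d2.items.filter (fun x => x.1 ≠ kp.1)).map
          (fun x => (x.1, ((PySem.Set.inter (PySem.Set.ofList kp.2) (PySem.Set.ofList x.2)).length : Int))))
      let best_match := fun_sort_dict_values counts true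
      -- {k: v for k, v in best_match.items() if v != 0}
      let best_match2 : PySem.Dict String Int :=
        PySem.Dict.ofList (best_match.items.filter (fun p => p.2 ≠ 0))
      -- res[k] = list(best_match.keys())[:1]
      res.insert kp.1 (best_match2.keys.take 1)) PySem.Dict.empty
  res.items

-- ===== PORT B =====
def find_best_key_match_by_common_values_alt (mydict : List (String × List String)) : List (String × List String) :=
  -- aug[k] = list(dict.fromkeys((v if isinstance(v, list) else [v]) + [k]))
  let aug : PySem.Dict String (List String) :=
    (PySem.Dict.ofList mydict).items.foldl
      (fun aug p => aug.insert p.1 (PySem.List.dedup (p.2 ++ [p.1]))) PySem.Dict.empty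
  let res : PySem.Dict String (List String) :=
    aug.items.foldl (fun res kp =>
      let best : Option String × Int :=
        aug.items.foldl (fun best xp =>
          if xp.1 == kp.1 then best
          else
            let c : Int := ((xp.2.filter (fun z => (PySem.Set.ofList kp.2).contains z)).length : Int)
            if best.2 < c then (some xp.1, c) else best) ((none : Option String), (0 : Int))
      res.insert kp.1 (match best.1 with | some x => [x] | none => [])) PySem.Dict.empty
  res.items

-- ===== PRECONDITION & SPEC =====
def Spec_find_best_key_match_by_common_values (mydict : List (String × List String)) (out : List (String × List String)) : Prop := out = find_best_key_match_by_common_values_alt mydict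
instance (mydict : List (String × List String)) (out : List (String × List String)) : Decidable (Spec_find_best_key_match_by_common_values mydict out) := by unfold Spec_find_best_key_match_by_common_values; infer_instance

-- ===== CLAIM (what is proved, stated in full; the proofs are below) =====
def Claim_equal_find_best_key_match_by_common_values : Prop := ∀ (mydict : List (String × List String)), Dom_find_best_key_match_by_common_values mydict → Spec_find_best_key_match_by_common_values mydict (find_best_key_match_by_common_values mydict)

-- ===== LEMMAS AND PROOFS =====

-- proof-layer names for the intermediate lists of both ports
def pvL (mydict : List (String × List String)) : List (String × List String) :=
  (PySem.Dict.ofList mydict).items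

def pvM (mydict : List (String × List String)) : List (String × List String) :=
  (pvL mydict).map (fun p => (p.1, p.2 ++ [p.1]))

def pvMp (mydict : List (String × List String)) : List (String × List String) :=
  (pvL mydict).map (fun p => (p.1, PySem.List.dedup (p.2 ++ [p.1])))

def pvCntA (vk : List String) (x : String × List String) : Int :=
  ((PySem.Set.inter (PySem.Set.ofList vk) (PySem.Set.ofList x.2)).length : Int)

def pvCntB (vkset : PySem.Set String) (xp : String × List String) : Int :=
  ((xp.2.filter (fun z => vkset.contains z)).length : Int)

def pvClA (mydict : List (String × List String)) (kp : String × List String) : List (String × Int) :=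
  ((pvM mydict).filter (fun x => x.1 ≠ kp.1)).map (fun x => (x.1, pvCntA kp.2 x))

def pvSelA (mydict : List (String × List String)) (kp : String × List String) : List String :=
  (((PySem.List.sorted (pvClA mydict kp) (fun it => it.2) true).filter
      (fun p => p.2 ≠ 0)).map Prod.fst).take 1

def pvStep (b : Option String × Int) (q : String × Int) : Option String × Int :=
  if b.2 < q.2 then (some q.1, q.2) else b

def pvSelB (mydict : List (String × List String)) (kp : String × List String) : List String :=
  match ((pvMp mydict).foldl (fun best xp =>
      if xp.1 == kp.1 then best
      else pvStep best (xp.1, pvCntB (PySem.Set.ofList kp.2) xp))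
        ((none : Option String), (0 : Int))).1 with
  | some x => [x]
  | none => []

def pvIns (q : String × Int) (l : List (String × Int)) : List (String × Int) :=
  PySem.List.insertBy (fun a b => decide (b.2 < a.2)) q l

theorem pv_items_ofList_of_nodup {ν : Type} (l : List (String × ν))
    (h : (l.map Prod.fst).Nodup) : (PySem.Dict.ofList l).items = l := by
  have h0 := PySem.Dict.items_foldl_insert_fresh l Prod.fst Prod.snd PySem.Dict.empty
    (fun a _ => PySem.Dict.contains_empty a.1) h
  simpa [PySem.Dict.ofList, PySem.Dict.update, PySem.Dict.empty] using h0

-- |set(a) & set(b)| counted as "elements of dedup(b) lying in set(dedup(a))"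
theorem pv_count_eq (a b : List String) :
    ((PySem.Set.inter (PySem.Set.ofList a) (PySem.Set.ofList b)).length : Int)
      = (((PySem.List.dedup b).filter
            (fun z => (PySem.Set.ofList (PySem.List.dedup a)).contains z)).length : Int) := by
  have h1 : (PySem.Set.inter (PySem.Set.ofList a) (PySem.Set.ofList b)).Nodup :=
    PySem.Set.nodup_inter _ _ (PySem.Set.nodup_ofList a)
  have h2 : ((PySem.List.dedup b).filter
      (fun z => (PySem.Set.ofList (PySem.List.dedup a)).contains z)).Nodup :=
    (PySem.List.nodup_dedup b).filter _
  have hperm : (PySem.Set.inter (PySem.Set.ofList a) (PySem.Set.ofList b)).Perm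
      ((PySem.List.dedup b).filter
        (fun z => (PySem.Set.ofList (PySem.List.dedup a)).contains z)) := by
    rw [List.perm_ext_iff_of_nodup h1 h2]
    intro x
    simp only [PySem.Set.mem_inter, List.mem_filter, PySem.List.dedup_eq_ofList,
      PySem.Set.ofList_ofList, PySem.Set.contains_iff, PySem.Set.mem_ofList]
    tauto
  exact congrArg Nat.cast hperm.length_eq

-- a fold that skips the current key is a fold over the filtered-and-mapped pair list
theorem pv_foldl_skip {β : Type} (k : String) (g : β → (String × Int) → β)
    (c : (String × List String) → Int) :
    ∀ (l : List (String × List String)) (init : β),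
      l.foldl (fun b xp => if xp.1 == k then b else g b (xp.1, c xp)) init
        = ((l.filter (fun x => x.1 ≠ k)).map (fun x => (x.1, c x))).foldl g init := by
  intro l
  induction l with
  | nil => intro init; rfl
  | cons p l ih =>
    intro init
    by_cases h : p.1 = k
    · rw [List.foldl_cons, if_pos (by simpa using h),
        List.filter_cons_of_neg (by simpa using h)]
      exact ih init
    · rw [List.foldl_cons, if_neg (by simpa using h),
        List.filter_cons_of_pos (by simpa using h), List.map_cons, List.foldl_cons]
      exact ih (g init (p.1, c p))

theorem pv_ins_nil (q : String × Int) : pvIns q [] = [q] := rfl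

theorem pv_ins_cons (q h : String × Int) (t : List (String × Int)) :
    pvIns q (h :: t) = if h.2 < q.2 then q :: h :: t else h :: pvIns q t := by
  simp [pvIns, PySem.List.insertBy]

theorem pv_sorted_append (cl : List (String × Int)) (q : String × Int) :
    PySem.List.sorted (cl ++ [q]) (fun it : String × Int => it.2) true
      = pvIns q (PySem.List.sorted cl (fun it => it.2) true) := by
  rw [PySem.List.sorted_rev_eq_foldl_insertBy (cl ++ [q]), List.foldl_append,
    ← PySem.List.sorted_rev_eq_foldl_insertBy cl]
  rfl

-- invariant linking the strict-argmax fold with the head of the stable descending sort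
theorem pv_inv (cl : List (String × Int)) (hnn : ∀ p ∈ cl, 0 ≤ p.2) :
    (PySem.List.sorted cl (fun it => it.2) true = [] ∧
      cl.foldl pvStep ((none : Option String), (0 : Int)) = (none, 0)) ∨
    (∃ h t, PySem.List.sorted cl (fun it => it.2) true = h :: t ∧ 0 ≤ h.2 ∧
      (h.2 = 0 → cl.foldl pvStep ((none : Option String), (0 : Int)) = (none, 0)) ∧
      (0 < h.2 → cl.foldl pvStep ((none : Option String), (0 : Int)) = (some h.1, h.2))) := by
  induction cl using List.reverseRecOn with
  | nil => left; exact ⟨rfl, rfl⟩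
  | append_singleton cl q ih =>
    have hq : 0 ≤ q.2 := hnn q (by simp)
    have hnn' : ∀ p ∈ cl, 0 ≤ p.2 := fun p hp => hnn p (by simp [hp])
    have hfold : (cl ++ [q]).foldl pvStep ((none : Option String), (0 : Int))
        = pvStep (cl.foldl pvStep ((none : Option String), (0 : Int))) q := by
      rw [List.foldl_append]; rfl
    rcases ih hnn' with ⟨hs, hb⟩ | ⟨h, t, hs, hh0, hz, hp⟩
    · right
      refine ⟨q, [], ?_, hq, ?_, ?_⟩
      · rw [pv_sorted_append, hs, pv_ins_nil]
      · intro h0; rw [hfold, hb]; simp [pvStep, h0]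
      · intro h0; rw [hfold, hb]; simp [pvStep, h0]
    · by_cases hlt : h.2 < q.2
      · right
        refine ⟨q, h :: t, ?_, hq, ?_, ?_⟩
        · rw [pv_sorted_append, hs, pv_ins_cons, if_pos hlt]
        · intro h0; omega
        · intro _
          rw [hfold]
          have hb2 : (cl.foldl pvStep ((none : Option String), (0 : Int))).2 < q.2 := by
            have : h.2 = 0 ∨ 0 < h.2 := by omega
            rcases this with h0 | h0
            · rw [hz h0]; omega
            · rw [hp h0]; exact hlt
          simp [pvStep, hb2]
      · right
        refine ⟨h, pvIns q t, ?_, hh0, ?_, ?_⟩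
        · rw [pv_sorted_append, hs, pv_ins_cons, if_neg hlt]
        · intro h0
          have hq0 : q.2 = 0 := by omega
          rw [hfold, hz h0]; simp [pvStep, hq0]
        · intro h0
          rw [hfold, hp h0]; simp [pvStep, hlt]

-- the selection lemma: strict argmax scan = head of (stable desc sort with zeros removed)
theorem pv_selection (cl : List (String × Int)) (hnn : ∀ p ∈ cl, 0 ≤ p.2) :
    (match (cl.foldl pvStep ((none : Option String), (0 : Int))).1 with
      | some x => [x] | none => ([] : List String))
    = (((PySem.List.sorted cl (fun it => it.2) true).filter
          (fun p => p.2 ≠ 0)).map Prod.fst).take 1 := by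
  rcases pv_inv cl hnn with ⟨hs, hb⟩ | ⟨h, t, hs, hh0, hz, hp⟩
  · rw [hs, hb]; rfl
  · have : h.2 = 0 ∨ 0 < h.2 := by omega
    rcases this with h0 | h0
    · rw [hs, hz h0]
      have hall : ∀ p ∈ (h :: t), p.2 = 0 := by
        intro p hp
        have hmem : p ∈ PySem.List.sorted cl (fun it : String × Int => it.2) true := by
          rw [hs]; exact hp
        have hge : 0 ≤ p.2 := hnn p ((PySem.List.mem_sorted cl _ true p).mp hmem)
        have hpw := PySem.List.sorted_pairwise_rev cl (fun it : String × Int => it.2)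
        rw [hs] at hpw
        rcases List.mem_cons.mp hp with rfl | hpt
        · omega
        · have hle : p.2 ≤ h.2 := (List.pairwise_cons.mp hpw).1 p hpt
          omega
      have hfil : (h :: t).filter (fun p => p.2 ≠ 0) = [] := by
        rw [List.filter_eq_nil_iff]
        intro p hp
        simp [hall p hp]
      rw [hfil]; rfl
    · rw [hs, hp h0]
      have hne : h.2 ≠ 0 := by omega
      simp [hne]


-- the per-key body of port A, named: counts dict → sorted → zeros dropped → first key
theorem pv_bigA (mydict : List (String × List String))
    (hM : ((((PySem.Dict.ofList mydict).items.map (fun p => (p.1, p.2 ++ [p.1]))).map Prod.fst)).Nodup) (kp : String × List String) :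
    List.take 1 (PySem.Dict.ofList (List.filter (fun p => decide (p.2 ≠ 0))
      (PySem.Dict.ofList (PySem.List.sorted (PySem.Dict.ofList (List.map (fun x => (x.1, ((List.length ((PySem.Set.ofList kp.2).inter (PySem.Set.ofList x.2))) : Int))) (List.filter (fun x => decide (x.1 ≠ kp.1)) ((PySem.Dict.ofList mydict).items.map (fun p => (p.1, p.2 ++ [p.1])))))).items
        (fun it => it.2) true)).items)).keys = pvSelA mydict kp := by
  have h1 : (((List.map (fun x => (x.1, ((List.length ((PySem.Set.ofList kp.2).inter (PySem.Set.ofList x.2))) : Int))) (List.filter (fun x => decide (x.1 ≠ kp.1)) ((PySem.Dict.ofList mydict).items.map (fun p => (p.1, p.2 ++ [p.1])))))).map Prod.fst).Nodup := by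
    have he : ((List.map (fun x => (x.1, ((List.length ((PySem.Set.ofList kp.2).inter (PySem.Set.ofList x.2))) : Int))) (List.filter (fun x => decide (x.1 ≠ kp.1)) ((PySem.Dict.ofList mydict).items.map (fun p => (p.1, p.2 ++ [p.1])))))).map Prod.fst
        = (List.filter (fun x => decide (x.1 ≠ kp.1)) ((PySem.Dict.ofList mydict).items.map (fun p => (p.1, p.2 ++ [p.1])))).map Prod.fst := by
      rw [List.map_map]; exact List.map_congr_left (fun a _ => rfl)
    rw [he]
    exact List.Nodup.sublist (List.Sublist.map Prod.fst List.filter_sublist) hM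
  rw [pv_items_ofList_of_nodup _ h1]
  have h2 : (((PySem.List.sorted (List.map (fun x => (x.1, ((List.length ((PySem.Set.ofList kp.2).inter (PySem.Set.ofList x.2))) : Int))) (List.filter (fun x => decide (x.1 ≠ kp.1)) ((PySem.Dict.ofList mydict).items.map (fun p => (p.1, p.2 ++ [p.1]))))) (fun it => it.2) true)).map Prod.fst).Nodup := by
    have hp := (PySem.List.sorted_perm (List.map (fun x => (x.1, ((List.length ((PySem.Set.ofList kp.2).inter (PySem.Set.ofList x.2))) : Int))) (List.filter (fun x => decide (x.1 ≠ kp.1)) ((PySem.Dict.ofList mydict).items.map (fun p => (p.1, p.2 ++ [p.1]))))) (fun it : String × Int => it.2) true).map Prod.fst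
    exact (List.Perm.nodup_iff hp).mpr h1
  rw [pv_items_ofList_of_nodup _ h2]
  simp only [PySem.Dict.keys]
  have h3 : (((List.filter (fun p => decide (p.2 ≠ 0)) (PySem.List.sorted (List.map (fun x => (x.1, ((List.length ((PySem.Set.ofList kp.2).inter (PySem.Set.ofList x.2))) : Int))) (List.filter (fun x => decide (x.1 ≠ kp.1)) ((PySem.Dict.ofList mydict).items.map (fun p => (p.1, p.2 ++ [p.1]))))) (fun it => it.2) true))).map Prod.fst).Nodup :=
    List.Nodup.sublist (List.Sublist.map Prod.fst List.filter_sublist) h2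
  rw [pv_items_ofList_of_nodup _ h3]
  rfl

-- port A, rewritten as a map over the augmented pair list
theorem pv_A_eq (mydict : List (String × List String))
    (hM : ((((PySem.Dict.ofList mydict).items.map (fun p => (p.1, p.2 ++ [p.1]))).map Prod.fst)).Nodup) :
    find_best_key_match_by_common_values mydict
      = (pvM mydict).map (fun kp => (kp.1, pvSelA mydict kp)) := by
  have hd2 := pv_items_ofList_of_nodup _ hM
  simp only [find_best_key_match_by_common_values, fun_sort_dict_values, hd2]
  simp only [pv_bigA mydict hM]
  rw [PySem.Dict.items_foldl_insert_fresh _ Prod.fst (pvSelA mydict) PySem.Dict.empty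
    (fun a _ => PySem.Dict.contains_empty a.1) hM]
  simp only [pvM, pvL, PySem.Dict.empty, List.nil_append]

-- the per-key body of port B, named (definitional: same term as pvSelB)
theorem pv_bigB (mydict : List (String × List String)) (kp : String × List String) :
    (match (List.foldl (fun best xp =>
        if xp.1 == kp.1 then best
        else
          if best.2 < ((xp.2.filter (fun z => (PySem.Set.ofList kp.2).contains z)).length : Int)
          then (some xp.1, ((xp.2.filter (fun z => (PySem.Set.ofList kp.2).contains z)).length : Int))
          else best)
        ((none : Option String), (0 : Int)) (List.map (fun p => (p.1, PySem.List.dedup (p.2 ++ [p.1]))) (PySem.Dict.ofList mydict).items)).1 with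
      | some x => [x] | none => ([] : List String)) = pvSelB mydict kp := rfl

-- port B, rewritten as a map over the deduplicated augmented pair list
theorem pv_B_eq (mydict : List (String × List String))
    (hL : (((PySem.Dict.ofList mydict).items.map Prod.fst)).Nodup) :
    find_best_key_match_by_common_values_alt mydict
      = (pvMp mydict).map (fun kp => (kp.1, pvSelB mydict kp)) := by
  have haug := PySem.Dict.items_foldl_insert_fresh ((PySem.Dict.ofList mydict).items) Prod.fst
    (fun p => PySem.List.dedup (p.2 ++ [p.1])) PySem.Dict.empty
    (fun a _ => PySem.Dict.contains_empty a.1) hL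
  have haug2 : (List.foldl (fun (aug : PySem.Dict String (List String)) p =>
      aug.insert p.1 (PySem.List.dedup (p.2 ++ [p.1]))) PySem.Dict.empty
        (PySem.Dict.ofList mydict).items).items = (List.map (fun p => (p.1, PySem.List.dedup (p.2 ++ [p.1]))) (PySem.Dict.ofList mydict).items) := by
    simpa using haug
  have hMp : (((List.map (fun p => (p.1, PySem.List.dedup (p.2 ++ [p.1]))) (PySem.Dict.ofList mydict).items).map Prod.fst)).Nodup := by
    have he : (List.map (fun p => (p.1, PySem.List.dedup (p.2 ++ [p.1]))) (PySem.Dict.ofList mydict).items).map Prod.fst = (PySem.Dict.ofList mydict).items.map Prod.fst := by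
      rw [List.map_map]; exact List.map_congr_left (fun a _ => rfl)
    rw [he]; exact hL
  simp only [find_best_key_match_by_common_values_alt, haug2]
  simp only [pv_bigB mydict]
  rw [PySem.Dict.items_foldl_insert_fresh _ Prod.fst (pvSelB mydict) PySem.Dict.empty
    (fun a _ => PySem.Dict.contains_empty a.1) hMp]
  simp only [pvMp, pvL, PySem.Dict.empty, List.nil_append]

theorem pv_Mp_eq (mydict : List (String × List String)) :
    pvMp mydict = (pvM mydict).map (fun x => (x.1, PySem.List.dedup x.2)) := by
  simp [pvMp, pvM, List.map_map]

-- per-key agreement of the two selections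
theorem pv_pointwise (mydict : List (String × List String)) (k : String) (v : List String) :
    pvSelA mydict (k, v ++ [k]) = pvSelB mydict (k, PySem.List.dedup (v ++ [k])) := by
  have hcl : ((pvMp mydict).filter (fun x => x.1 ≠ k)).map
      (fun x => (x.1, pvCntB (PySem.Set.ofList (PySem.List.dedup (v ++ [k]))) x))
      = pvClA mydict (k, v ++ [k]) := by
    rw [pv_Mp_eq, List.filter_map, List.map_map]
    simp only [pvClA]
    have hpred : ((fun x : String × List String => decide (x.1 ≠ k)) ∘
        (fun x : String × List String => (x.1, PySem.List.dedup x.2)))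
        = (fun x : String × List String => decide (x.1 ≠ (k, v ++ [k]).1)) := rfl
    rw [hpred]
    refine List.map_congr_left ?_
    intro x _
    simp only [Function.comp_def, pvCntA, pvCntB]
    exact congrArg (Prod.mk x.1) (pv_count_eq (v ++ [k]) x.2).symm
  have hnn : ∀ p ∈ pvClA mydict (k, v ++ [k]), 0 ≤ p.2 := by
    intro p hp
    simp only [pvClA] at hp
    rcases List.mem_map.mp hp with ⟨x, _, rfl⟩
    exact Int.natCast_nonneg _
  have hB : pvSelB mydict (k, PySem.List.dedup (v ++ [k]))
      = (match ((pvClA mydict (k, v ++ [k])).foldl pvStep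
          ((none : Option String), (0 : Int))).1 with
        | some x => [x] | none => ([] : List String)) := by
    show (match ((pvMp mydict).foldl (fun best xp =>
        if xp.1 == k then best
        else pvStep best (xp.1, pvCntB (PySem.Set.ofList (PySem.List.dedup (v ++ [k]))) xp))
          ((none : Option String), (0 : Int))).1 with
      | some x => [x] | none => ([] : List String)) = _
    rw [pv_foldl_skip k pvStep (pvCntB (PySem.Set.ofList (PySem.List.dedup (v ++ [k])))), hcl]
  rw [hB, pv_selection _ hnn]
  rfl

-- ===== VERDICT (by name: the statement is the Claim_ definition above) =====
theorem find_best_key_match_by_common_values_spec : Claim_equal_find_best_key_match_by_common_values := by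
  intro mydict _
  unfold Spec_find_best_key_match_by_common_values
  have hL : (((PySem.Dict.ofList mydict).items.map Prod.fst)).Nodup := by
    have h0 := PySem.Dict.nodup_keys_ofList (ν := List String) mydict
    simpa [PySem.Dict.keys] using h0
  have hM : ((((PySem.Dict.ofList mydict).items.map (fun p => (p.1, p.2 ++ [p.1]))).map Prod.fst)).Nodup := by
    have he : ((PySem.Dict.ofList mydict).items.map (fun p => (p.1, p.2 ++ [p.1]))).map Prod.fst = (PySem.Dict.ofList mydict).items.map Prod.fst := by
      rw [List.map_map]; exact List.map_congr_left (fun a _ => rfl)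
    rw [he]; exact hL
  rw [pv_A_eq mydict hM, pv_B_eq mydict hL, pv_Mp_eq, List.map_map]
  refine List.map_congr_left ?_
  intro x hx
  have hx' : x ∈ (pvL mydict).map (fun p => (p.1, p.2 ++ [p.1])) := by simpa [pvM] using hx
  rcases List.mem_map.mp hx' with ⟨p, _, rfl⟩
  exact congrArg (Prod.mk p.1) (pv_pointwise mydict p.1 p.2)
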